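-- pv_equiv track=rewrite | github.com/li-angran/PICO_server | preprocessing/pick_broken_frame.py | replace_array
-- ===== SOURCE A (Python) =====
-- def replace_array(flag_array):
--     """Replaces bad frames with the nearest good frames.
--
--     Args:
--         file_list_array: List of file paths for each frame.
--         flag_array: List of boolean values indicating if a frame is good (True) or bad (False).
--
--     Returns:
--         List of pared (frame id needs to be replace, replaced frame id).
--     """
--     replace_frame_array = []
--     bad_frame_indices = [i for i, flag in enumerate(flag_array) if flag] # note how to deal with flag
--     good_frame_indices = [i for i, flag in enumerate(flag_array) if not flag]
--
--     for bad_idx in bad_frame_indices: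
--         closest_good_idx = None
--         min_distance = float("inf")
--
--         # Search backward for nearest good frame
--         for i in range(bad_idx - 1, -1, -1):
--             if i in good_frame_indices: # good frame
--                 distance = bad_idx - i
--                 if distance < min_distance:
--                     closest_good_idx = i
--                     min_distance = distance
--                 break  # Stop once the first good frame is found
--
--         # Search forward for nearest good frame (if closer than the backward one)
--         for i in range(bad_idx + 1, len(flag_array)):
--             if i in good_frame_indices:
--                 distance = i - bad_idx
--                 if distance < min_distance:
--                     closest_good_idx = i
--                 break
--
--         # Replace bad frame with nearest good frame (if found)
--         if closest_good_idx is not None: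
--             replace_frame_array.append([bad_idx, closest_good_idx])
--
--     return replace_frame_array
-- ===== SOURCE B (Python) =====
-- def replace_array(flag_array):
--     n = len(flag_array)
--     # prev_good[i] = nearest good index <= i; next_good[i] = nearest good index >= i
--     prev_good = [None] * n
--     last = None
--     for i, flag in enumerate(flag_array):
--         if not flag:
--             last = i
--         prev_good[i] = last
--     next_good = [None] * n
--     nxt = None
--     for i in range(n - 1, -1, -1):
--         if not flag_array[i]:
--             nxt = i
--         next_good[i] = nxt
--     out = []
--     for i, flag in enumerate(flag_array):
--         if flag:
--             p, q = prev_good[i], next_good[i]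
--             if p is not None and (q is None or i - p <= q - i):
--                 out.append([i, p])
--             elif q is not None:
--                 out.append([i, q])
--     return out
-- ===== Notes on version B (the rewrite author's own statement) =====
-- stated objective: faster
-- what changed: Replaced A's per-bad-frame backward/forward scans with linear membership tests in the good-index list by two linear sweeps building prev-good/next-good tables plus one combining pass.
import Mathlib
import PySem

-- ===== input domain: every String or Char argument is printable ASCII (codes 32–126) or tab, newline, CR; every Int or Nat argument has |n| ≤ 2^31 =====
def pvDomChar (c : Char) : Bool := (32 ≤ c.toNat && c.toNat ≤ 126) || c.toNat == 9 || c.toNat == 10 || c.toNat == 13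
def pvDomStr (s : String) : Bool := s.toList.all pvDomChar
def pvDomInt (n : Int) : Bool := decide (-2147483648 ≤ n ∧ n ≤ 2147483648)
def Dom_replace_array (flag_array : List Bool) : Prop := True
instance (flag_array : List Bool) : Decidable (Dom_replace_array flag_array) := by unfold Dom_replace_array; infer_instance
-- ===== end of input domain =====

-- B replaces A's per-bad-frame backward/forward scans by two linear prev/next-good tables and one combining pass (objective: faster, O(n^2)→O(n)).

-- ===== PORT A =====
-- the backward/forward search loops with break: first index of the range that is a good frame
def firstInGood (good : List Int) : List Int → Option Int
  | [] => none
  | i :: rest => if good.contains i then some i else firstInGood good rest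

-- body of A's main loop over bad_frame_indices
def aStep (good : List Int) (n : Int) (acc : List (List Int)) (bad_idx : Int) : List (List Int) :=
  let back := firstInGood good (PySem.List.pyRange (bad_idx - 1) (-1) (-1))
  let closest : Option Int :=
    match firstInGood good (PySem.List.pyRange (bad_idx + 1) n 1) with
    | none => back
    | some j =>
      match back with
      | none => some j
      | some p => if j - bad_idx < bad_idx - p then some j else some p
  match closest with
  | none => acc
  | some c => acc ++ [[bad_idx, c]]

def replace_array (flag_array : List Bool) : List (List Int) :=
  let bad := ((PySem.List.enumerate flag_array 0).filter (fun p => p.2)).map (fun p => p.1)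
  let good := ((PySem.List.enumerate flag_array 0).filter (fun p => !p.2)).map (fun p => p.1)
  bad.foldl (aStep good (flag_array.length : Int)) []

-- ===== PORT B =====
-- left-to-right sweep: prev_good[i] = nearest good index ≤ i
def prevTable : List Bool → Option Int → Int → List (Option Int)
  | [], _, _ => []
  | b :: rest, last, i =>
    let last' := if b then last else some i
    last' :: prevTable rest last' (i + 1)

-- right-to-left sweep: next_good[i] = nearest good index ≥ i
def nextTable : List Bool → Int → List (Option Int)
  | [], _ => []
  | b :: rest, i =>
    let t := nextTable rest (i + 1)
    (if b then t.headD none else some i) :: t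

-- final combining pass over (flag, prev, next)
def combineB : List (Bool × Option Int × Option Int) → Int → List (List Int)
  | [], _ => []
  | (b, p, q) :: rest, i =>
    let tail := combineB rest (i + 1)
    if b then
      match p, q with
      | some pv, some qv => (if i - pv ≤ qv - i then [i, pv] else [i, qv]) :: tail
      | some pv, none => [i, pv] :: tail
      | none, some qv => [i, qv] :: tail
      | none, none => tail
    else tail

def replace_array_alt (flag_array : List Bool) : List (List Int) :=
  let prev := prevTable flag_array none 0
  let next := nextTable flag_array 0
  combineB (flag_array.zip (prev.zip next)) 0

-- ===== PRECONDITION & SPEC =====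
def Spec_replace_array (flag_array : List Bool) (out : List (List Int)) : Prop := out = replace_array_alt flag_array
instance (flag_array : List Bool) (out : List (List Int)) : Decidable (Spec_replace_array flag_array out) := by unfold Spec_replace_array; infer_instance

-- ===== CLAIM (what is proved, stated in full; the proofs are below) =====
def Claim_equal_replace_array : Prop := ∀ (flag_array : List Bool), Dom_replace_array flag_array → Spec_replace_array flag_array (replace_array flag_array)

-- ===== LEMMAS AND PROOFS =====

-- A's good-index list
def goodsOf (flag : List Bool) : List Int :=
  ((PySem.List.enumerate flag 0).filter (fun p => !p.2)).map (fun p => p.1)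

-- nearest good index < k (downward from k)
def dn (flag : List Bool) : Nat → Option Int
  | 0 => none
  | k+1 => if flag.getD k true then dn flag k else some (k : Int)

-- nearest good index ≥ offset in a suffix
def upA : List Bool → Int → Option Int
  | [], _ => none
  | b :: rest, k => if b then upA rest (k + 1) else some k

-- the common per-bad-frame choice (prev preferred on ties)
def chooseS (p q : Option Int) (i : Int) : Option Int :=
  match p, q with
  | some pv, some qv => if i - pv ≤ qv - i then some pv else some qv
  | some pv, none => some pv
  | none, some qv => some qv
  | none, none => none

-- the common reference computation over a suffix, carrying the last good index seen
def specL : List Bool → Option Int → Int → List (List Int)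
  | [], _, _ => []
  | b :: rest, last, k =>
    if b then
      (match chooseS last (upA rest (k + 1)) k with
       | some c => [[k, c]]
       | none => []) ++ specL rest last (k + 1)
    else specL rest (some k) (k + 1)

lemma mem_goodsOf (flag : List Bool) (j : Int) :
    j ∈ goodsOf flag ↔ ∃ k : Nat, ∃ _ : k < flag.length, j = (k : Int) ∧ flag[k] = false := by
  simp [goodsOf, List.mem_map, List.mem_filter, PySem.List.mem_enumerate_iff]

lemma back_eq_dn (flag : List Bool) : ∀ k : Nat, k ≤ flag.length →
    firstInGood (goodsOf flag) (PySem.List.pyRange ((k : Int) - 1) (-1) (-1)) = dn flag k := by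
  intro k
  induction k with
  | zero =>
    intro _
    rw [PySem.List.pyRange_neg_one_eq_nil (by omega)]
    rfl
  | succ k ih =>
    intro hk
    have hklt : k < flag.length := by omega
    have h1 : ((k+1 : Nat) : Int) - 1 = (k : Int) := by push_cast; ring
    rw [h1, PySem.List.pyRange_neg_one_cons (by omega)]
    have hgd : flag.getD k true = flag[k] := by
      simp [List.getD, List.getElem?_eq_getElem hklt]
    have hmem : ((k : Int) ∈ goodsOf flag) ↔ flag[k] = false := by
      rw [mem_goodsOf]
      constructor
      · rintro ⟨k', hk', hEq, hf⟩
        have : k' = k := by exact_mod_cast hEq.symm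
        subst this; exact hf
      · intro h; exact ⟨k, hklt, rfl, h⟩
    simp only [firstInGood, dn, List.contains_iff_mem]
    cases hfk : flag[k] with
    | false =>
      rw [if_pos (hmem.mpr hfk), if_neg (by rw [hgd, hfk]; simp)]
    | true =>
      rw [if_neg (by simp [hmem, hfk]), ih (by omega), if_pos (by rw [hgd, hfk])]

lemma fwd_eq_upA (flag : List Bool) : ∀ (d : List Bool) (k : Nat), flag.drop k = d →
    firstInGood (goodsOf flag) (PySem.List.pyRange (k : Int) (flag.length : Int) 1) = upA d (k : Int) := by
  intro d
  induction d with
  | nil =>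
    intro k hd
    have : flag.length ≤ k := by
      have := congrArg List.length hd; simp at this; omega
    rw [PySem.List.pyRange_one_eq_nil (by omega)]
    rfl
  | cons b rest ih =>
    intro k hd
    have hlt : k < flag.length := by
      have := congrArg List.length hd; simp at this; omega
    have hb : flag[k] = b := by
      have h0 : flag[k + 0]'(by omega) = (flag.drop k)[0]'(by simp [hd]) :=
        (List.getElem_drop ..).symm
      simpa [hd] using h0
    have hrest : flag.drop (k+1) = rest := by
      have := congrArg (List.drop 1) hd
      simpa [List.drop_drop] using this
    have hmem : ((k : Int) ∈ goodsOf flag) ↔ flag[k] = false := by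
      rw [mem_goodsOf]
      constructor
      · rintro ⟨k', hk', hEq, hf⟩
        have : k' = k := by exact_mod_cast hEq.symm
        subst this; exact hf
      · intro h; exact ⟨k, hlt, rfl, h⟩
    rw [PySem.List.pyRange_one_cons (by omega)]
    simp only [firstInGood, upA, List.contains_iff_mem]
    cases b with
    | false =>
      rw [if_pos (hmem.mpr hb), if_neg (by simp)]
    | true =>
      rw [if_neg (by simp [hmem, hb]), if_pos rfl]
      have := ih (k+1) hrest
      push_cast at this ⊢
      exact this

lemma aStep_spec (flag : List Bool) (k : Nat) (rest : List Bool) (acc : List (List Int))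
    (hd : flag.drop k = true :: rest) :
    aStep (goodsOf flag) (flag.length : Int) acc (k : Int)
      = acc ++ (match chooseS (dn flag k) (upA rest ((k : Int) + 1)) (k : Int) with
                | some c => [[(k : Int), c]]
                | none => []) := by
  have hlt : k < flag.length := by
    have := congrArg List.length hd; simp at this; omega
  have hback : firstInGood (goodsOf flag) (PySem.List.pyRange ((k : Int) - 1) (-1) (-1)) = dn flag k :=
    back_eq_dn flag k (by omega)
  have hrest : flag.drop (k+1) = rest := by
    have := congrArg (List.drop 1) hd
    simpa [List.drop_drop] using this
  have hfwd : firstInGood (goodsOf flag) (PySem.List.pyRange ((k : Int) + 1) (flag.length : Int) 1)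
      = upA rest ((k : Int) + 1) := by
    have := fwd_eq_upA flag rest (k+1) hrest
    push_cast at this ⊢
    exact this
  unfold aStep
  rw [hback, hfwd]
  cases hdn : dn flag k with
  | none =>
    cases hup : upA rest ((k : Int) + 1) with
    | none => simp [chooseS]
    | some j => simp [chooseS]
  | some p =>
    cases hup : upA rest ((k : Int) + 1) with
    | none => simp [chooseS]
    | some j =>
      simp only [chooseS]
      by_cases hc : j - (k : Int) < (k : Int) - p
      · rw [if_pos hc, if_neg (by omega)]
      · rw [if_neg hc, if_pos (by omega)]

lemma a_fold (flag : List Bool) : ∀ (d : List Bool) (k : Nat) (acc : List (List Int)),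
    flag.drop k = d →
    List.foldl (aStep (goodsOf flag) (flag.length : Int)) acc
        (((PySem.List.enumerate d (k : Int)).filter (fun p => p.2)).map (fun p => p.1))
      = acc ++ specL d (dn flag k) (k : Int) := by
  intro d
  induction d with
  | nil => intro k acc _; simp [specL]
  | cons b rest ih =>
    intro k acc hd
    have hlt : k < flag.length := by
      have := congrArg List.length hd; simp at this; omega
    have hgd : flag.getD k true = flag[k] := by
      simp [List.getD, List.getElem?_eq_getElem hlt]
    have hb : flag[k] = b := by
      have h0 : flag[k + 0]'(by omega) = (flag.drop k)[0]'(by simp [hd]) :=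
        (List.getElem_drop ..).symm
      simpa [hd] using h0
    have hrest : flag.drop (k+1) = rest := by
      have := congrArg (List.drop 1) hd
      simpa [List.drop_drop] using this
    rw [PySem.List.enumerate_cons]
    cases b with
    | false =>
      have hdn1 : dn flag (k+1) = some (k : Int) := by
        simp [dn, List.getElem?_eq_getElem hlt, hb]
      have := ih (k+1) acc hrest
      rw [hdn1] at this
      push_cast at this
      simpa [List.filter_cons, specL] using this
    | true =>
      have hdn1 : dn flag (k+1) = dn flag k := by
        simp [dn, List.getElem?_eq_getElem hlt, hb]
      have hstep := aStep_spec flag k rest acc hd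
      have := ih (k+1) (aStep (goodsOf flag) (flag.length : Int) acc (k : Int)) hrest
      rw [hdn1] at this
      push_cast at this
      simp only [List.filter_cons, if_pos, List.map_cons, List.foldl_cons, specL]
      rw [this, hstep]
      simp [List.append_assoc]

lemma nextTable_headD (d : List Bool) (m : Int) :
    (nextTable d m).headD none = upA d m := by
  induction d generalizing m with
  | nil => rfl
  | cons b rest ih =>
    cases b with
    | false => simp [nextTable, upA]
    | true =>
      simp only [nextTable, upA, if_true]
      simpa [List.headD] using ih (m+1)

lemma b_spec : ∀ (d : List Bool) (last : Option Int) (m : Int),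
    combineB (d.zip ((prevTable d last m).zip (nextTable d m))) m = specL d last m := by
  intro d
  induction d with
  | nil => intro last m; rfl
  | cons b rest ih =>
    intro last m
    cases b with
    | false =>
      simp only [prevTable, nextTable, List.zip_cons_cons, combineB, specL]
      simp [ih]
    | true =>
      simp only [prevTable, nextTable, List.zip_cons_cons, combineB, specL, if_true]
      rw [nextTable_headD rest (m+1)]
      cases last <;> cases hu : upA rest (m+1) <;>
        · simp [chooseS, hu, ih]
          try (split <;> simp)

-- ===== VERDICT (by name: the statement is the Claim_ definition above) =====
theorem replace_array_spec : Claim_equal_replace_array := by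
  intro flag _
  unfold Spec_replace_array replace_array replace_array_alt
  rw [b_spec]
  have := a_fold flag flag 0 [] rfl
  simpa [goodsOf, dn] using this
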